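-- pv_equiv track=rewrite | github.com/ail-project/ail-feeder-ct | bin/feeder_ct.py | deleteHead
-- ===== SOURCE A (Python) =====
-- def deleteHead(domain):
--     """If domains begins with *, delete the 2 first caracters"""
--     if domain.split(".")[0] == "*":
--         locDomain = ""
--         for element in domain.split(".")[1:]:
--             locDomain += element + "."
--
--         locDomain = locDomain[:-1].rstrip("\n")
--         return locDomain
--
--     return domain
-- ===== SOURCE B (Python) =====
-- def deleteHead(domain):
--     """If domains begins with *, delete the 2 first caracters"""
--     if domain == "*" or domain.startswith("*."):
--         return domain[2:].rstrip("\n")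
--     return domain
-- ===== Notes on version B (the rewrite author's own statement) =====
-- stated objective: simpler
-- what changed: Replaces the split-into-segments, loop-and-rebuild-with-dots, drop-last-char reconstruction with a direct prefix test (domain == '*' or startswith '*.') and a single slice domain[2:].rstrip(' '); no segment list and no loop.
import Mathlib
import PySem

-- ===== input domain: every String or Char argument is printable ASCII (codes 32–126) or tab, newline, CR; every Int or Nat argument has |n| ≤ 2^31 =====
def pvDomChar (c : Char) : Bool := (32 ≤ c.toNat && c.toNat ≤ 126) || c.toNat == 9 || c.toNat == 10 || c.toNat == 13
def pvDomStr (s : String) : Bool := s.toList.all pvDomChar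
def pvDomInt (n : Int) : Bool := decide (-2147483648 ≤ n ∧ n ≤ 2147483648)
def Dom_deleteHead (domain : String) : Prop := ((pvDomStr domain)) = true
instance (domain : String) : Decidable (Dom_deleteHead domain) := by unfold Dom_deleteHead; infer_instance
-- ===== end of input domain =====

-- B replaces A's split / loop-and-rebuild / drop-last-char reconstruction with a prefix test and one slice; objective: simpler.

-- ===== PORT A =====
-- hand port of s.rstrip("\n") (PySem has no rstrip-with-chars form): drop all trailing '\n'; exact.
def rstripNl (cs : List Char) : List Char := (cs.reverse.dropWhile (· == '\n')).reverse

def deleteHead (domain : String) : String :=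
  let parts := PySem.Chars.splitOn domain.toList ['.']
  if PySem.List.pyGet? parts 0 == some ['*'] then
    let locDomain := (PySem.List.slice parts (some 1) none).foldl
      (fun acc e => acc ++ e ++ ['.']) ([] : List Char)
    let locDomain := rstripNl (PySem.List.slice locDomain none (some (-1)))
    String.ofList locDomain
  else domain

-- ===== PORT B =====
def deleteHead_alt (domain : String) : String :=
  if domain == "*" || PySem.Str.startswith domain "*." then
    String.ofList (rstripNl (PySem.List.slice domain.toList (some 2) none))
  else domain

-- ===== PRECONDITION & SPEC =====
def Spec_deleteHead (domain : String) (out : String) : Prop := out = deleteHead_alt domain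
instance (domain : String) (out : String) : Decidable (Spec_deleteHead domain out) := by unfold Spec_deleteHead; infer_instance

-- ===== CLAIM (what is proved, stated in full; the proofs are below) =====
def Claim_equal_deleteHead : Prop := ∀ (domain : String), Dom_deleteHead domain → Spec_deleteHead domain (deleteHead domain)

-- ===== LEMMAS AND PROOFS =====

-- splitOn.go prepends acc.reverse to its result
lemma go_acc (sep : List Char) (fuel : Nat) (l cur : List Char) (acc : List (List Char)) :
    PySem.Chars.splitOn.go sep fuel l cur acc
      = acc.reverse ++ PySem.Chars.splitOn.go sep fuel l cur [] := by
  induction fuel generalizing l cur acc with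
  | zero => simp [PySem.Chars.splitOn.go]
  | succ n ih =>
    cases l with
    | nil => simp [PySem.Chars.splitOn.go]
    | cons c rest =>
      rw [PySem.Chars.splitOn.go, PySem.Chars.splitOn.go]
      split
      · rw [ih _ _ (cur.reverse :: acc), ih _ _ [cur.reverse]]
        simp
      · rw [ih rest (c :: cur) acc]

-- the first segment of split(".") is the run of characters before the first '.'
lemma go_head (fuel : Nat) (l cur : List Char) (h : l.length ≤ fuel) :
    (PySem.Chars.splitOn.go ['.'] fuel l cur []).head?
      = some (cur.reverse ++ l.takeWhile (fun c => !(c == '.'))) := by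
  induction fuel generalizing l cur with
  | zero =>
    have : l = [] := by cases l <;> simp_all
    subst this; simp [PySem.Chars.splitOn.go]
  | succ n ih =>
    cases l with
    | nil => simp [PySem.Chars.splitOn.go]
    | cons c rest =>
      rw [PySem.Chars.splitOn.go]
      split
      · rename_i hp
        have hc : c = '.' := by have := hp; simp [List.isPrefixOf] at this; exact this.symm
        subst hc
        rw [go_acc]
        simp
      · rename_i hp
        have hc : c ≠ '.' := by have := hp; simp [List.isPrefixOf] at this; exact fun e => this e.symm
        rw [ih rest (c :: cur) (by simpa using Nat.le_of_succ_le_succ h)]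
        simp [hc]

lemma splitOn_head (cs : List Char) :
    (PySem.Chars.splitOn cs ['.']).head? = some (cs.takeWhile (fun c => !(c == '.'))) := by
  rw [PySem.Chars.splitOn]
  simpa using go_head (cs.length + 1) cs [] (by omega)

-- gluing every segment back with a trailing '.' reconstructs the input plus one final '.'
lemma go_flat (fuel : Nat) (l cur : List Char) (h : l.length ≤ fuel) :
    (PySem.Chars.splitOn.go ['.'] fuel l cur []).flatMap (· ++ ['.'])
      = cur.reverse ++ l ++ ['.'] := by
  induction fuel generalizing l cur with
  | zero =>
    have : l = [] := by cases l <;> simp_all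
    subst this; simp [PySem.Chars.splitOn.go]
  | succ n ih =>
    cases l with
    | nil => simp [PySem.Chars.splitOn.go]
    | cons c rest =>
      rw [PySem.Chars.splitOn.go]
      split
      · rename_i hp
        have hc : c = '.' := by have := hp; simp [List.isPrefixOf] at this; exact this.symm
        subst hc
        rw [go_acc]
        have hr := ih rest [] (by simpa using Nat.le_of_succ_le_succ h)
        simp [hr]
      · rename_i hp
        have hc : c ≠ '.' := by have := hp; simp [List.isPrefixOf] at this; exact fun e => this e.symm
        rw [ih rest (c :: cur) (by simpa using Nat.le_of_succ_le_succ h)]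
        simp

lemma splitOn_flat (cs : List Char) :
    (PySem.Chars.splitOn cs ['.']).flatMap (· ++ ['.']) = cs ++ ['.'] := by
  rw [PySem.Chars.splitOn]
  simpa using go_flat (cs.length + 1) cs [] (by omega)

lemma splitOn_star_cons (rest : List Char) :
    PySem.Chars.splitOn ('*' :: '.' :: rest) ['.'] = ['*'] :: PySem.Chars.splitOn rest ['.'] := by
  rw [PySem.Chars.splitOn, PySem.Chars.splitOn]
  rw [PySem.Chars.splitOn.go]
  simp only [List.length_cons]
  rw [PySem.Chars.splitOn.go]
  norm_num [List.isPrefixOf]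
  rw [go_acc ['.'] (rest.length + 1) rest [] [['*']]]
  simp

-- A's guard (first split segment is "*") holds exactly when B's guard does
lemma takeWhile_star (cs : List Char) :
    (cs.takeWhile (fun c => !(c == '.')) = ['*'])
      ↔ (cs = ['*'] ∨ ['*', '.'] <+: cs) := by
  cases cs with
  | nil => simp
  | cons c t =>
    simp only [List.takeWhile_cons, List.cons_prefix_cons]
    by_cases hc : c = '.'
    · simp [hc]
    · by_cases hs : c = '*'
      · subst hs
        simp only [show (('*' : Char) == '.') = false from rfl]
        simp only [Bool.not_false, if_true]
        cases t with
        | nil => simp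
        | cons d u =>
          simp only [List.takeWhile_cons, List.cons_prefix_cons]
          by_cases hd : d = '.'
          · simp [hd]
          · simp [hd]
            exact fun e => hd e.symm
      · simp [hs, hc]
        exact fun e => absurd e.symm hs

lemma pyGet?_zero {α : Type} (xs : List α) : PySem.List.pyGet? xs 0 = xs.head? := by
  cases xs <;> simp [PySem.List.pyGet?, PySem.List.pyIdx?]

-- ===== VERDICT (by name: the statement is the Claim_ definition above) =====
theorem deleteHead_spec : Claim_equal_deleteHead := by
  intro domain _
  unfold Spec_deleteHead deleteHead deleteHead_alt
  simp only [pyGet?_zero, splitOn_head]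
  by_cases h : domain.toList.takeWhile (fun c => !(c == '.')) = ['*']
  · rcases (takeWhile_star _).mp h with hstar | ⟨rest, hrest⟩
    · -- domain is exactly "*"
      have hd : domain = "*" := by
        have := congrArg String.ofList hstar
        simpa [String.ofList_toList] using this
      subst hd
      decide
    · -- domain starts with "*."
      have hpre : ['*', '.'] <+: domain.toList := ⟨rest, hrest⟩
      have hB : (domain == "*" || PySem.Str.startswith domain "*.") = true := by
        have : PySem.Chars.startswith domain.toList ['*', '.'] = true :=
          (PySem.Chars.startswith_iff _ _).mpr hpre
        simp [PySem.Str.startswith_eq]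
        right
        simpa using this
      rw [if_pos (by simpa using h), if_pos hB]
      refine congrArg String.ofList ?_
      rw [← hrest]
      simp only [List.cons_append, List.nil_append]
      rw [splitOn_star_cons, PySem.List.slice_from_one, List.tail_cons]
      have hfold : (PySem.Chars.splitOn rest ['.']).foldl
          (fun acc e => acc ++ e ++ ['.']) ([] : List Char) = rest ++ ['.'] := by
        have := PySem.List.foldl_append_eq_flatMap (g := fun e : List Char => e ++ ['.'])
          (l := PySem.Chars.splitOn rest ['.']) (acc := ([] : List Char))
        simp only [← List.append_assoc] at this
        rw [this, List.nil_append, splitOn_flat]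
      rw [hfold, PySem.List.slice_to_neg_one, List.dropLast_concat]
      have hsl : PySem.List.slice ('*' :: '.' :: rest) (some 2) none = rest := by
        simp [PySem.List.slice, PySem.List.clampIdx]
      rw [hsl]
  · rw [if_neg (by simpa using h), if_neg ?_]
    intro hB
    apply h
    apply (takeWhile_star _).mpr
    rcases Bool.or_eq_true_iff.mp hB with h1 | h2
    · left
      have : domain = "*" := by simpa using h1
      simp [this]
    · right
      exact (PySem.Chars.startswith_iff _ _).mp (by simpa [PySem.Str.startswith_eq] using h2)
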